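-- pv_equiv track=rewrite | github.com/sahrishmustafa/TORCS-Self-Driving-Car-AI | source/msgParser.py | parse
-- ===== SOURCE A (Python) =====
-- def parse(str_sensors):
--     '''Return a dictionary with tags and values from the UDP message'''
--     sensors = {}
--
--     b_open = str_sensors.find('(')
--
--     while b_open >= 0:
--         b_close = str_sensors.find(')', b_open)
--         if b_close >= 0:
--             substr = str_sensors[b_open + 1: b_close]
--             items = substr.split()
--             if len(items) < 2:
--                 print ("Problem parsing substring: ", substr)
--             else:
--                 value = []
--                 for i in range(1,len(items)):
--                     value.append(items[i])
--                 sensors[items[0]] = value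
--             b_open = str_sensors.find('(', b_close)
--         else:
--             print ("Problem parsing sensor string: ", str_sensors)
--             return None
--
--     return sensors
-- ===== SOURCE B (Python) =====
-- def parse(str_sensors):
--     '''Return a dictionary with tags and values from the UDP message'''
--     sensors = {}
--
--     segs = str_sensors.split(')')
--
--     for seg in segs[:-1]:
--         idx = seg.find('(')
--         if idx >= 0:
--             substr = seg[idx + 1:]
--             items = substr.split()
--             if len(items) < 2:
--                 print ("Problem parsing substring: ", substr)
--             else:
--                 sensors[items[0]] = items[1:]
--
--     if '(' in segs[-1]:
--         print ("Problem parsing sensor string: ", str_sensors)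
--         return None
--
--     return sensors
-- ===== Notes on version B (the rewrite author's own statement) =====
-- stated objective: simpler
-- what changed: A repeatedly advances absolute find-indices for the opening and closing parenthesis in a while loop over the whole string; B instead splits the string once on the closing parenthesis and processes each chunk before the last independently (locate the opener inside the chunk, whitespace-split the remainder), returning None exactly when the leftover final chunk still holds an unmatched opener.
import Mathlib
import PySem

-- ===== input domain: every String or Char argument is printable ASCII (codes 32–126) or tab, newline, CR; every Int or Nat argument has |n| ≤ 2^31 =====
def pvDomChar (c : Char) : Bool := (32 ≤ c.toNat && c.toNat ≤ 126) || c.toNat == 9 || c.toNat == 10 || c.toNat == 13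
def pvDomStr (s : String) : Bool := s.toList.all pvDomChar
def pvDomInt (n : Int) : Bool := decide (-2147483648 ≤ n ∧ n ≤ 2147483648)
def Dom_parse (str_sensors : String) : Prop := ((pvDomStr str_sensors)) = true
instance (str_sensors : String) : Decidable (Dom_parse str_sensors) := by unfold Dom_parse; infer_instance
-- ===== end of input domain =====

-- B replaces A's index-advancing find loop by one pass over str_sensors.split(')') chunks (simpler, same
-- return value; the equivalence proved is about the return value — both also print the same messages).

-- ===== PORT A =====
-- A scans with absolute indices b_open/b_close into str_sensors; the port carries the yet-unscanned
-- suffix (starting at A's current b_open search position) so that every find/slice below is the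
-- corresponding call of A shifted by the number of characters already consumed — same characters
-- examined, same results.  items[i] / items[0] are always in range here, so pyGetD is exact.
def parseLoop (t : List Char) (sensors : PySem.Dict String (List String)) :
    Option (PySem.Dict String (List String)) :=
  let b_open := PySem.Chars.find t ['(']          -- b_open = str_sensors.find('(', pos)
  if h : 0 ≤ b_open then
    let rest := t.drop b_open.toNat               -- suffix from b_open
    let b_close := PySem.Chars.find rest [')']    -- b_close = str_sensors.find(')', b_open)
    if h2 : 0 ≤ b_close then
      let substr := (rest.take b_close.toNat).drop 1    -- str_sensors[b_open+1 : b_close]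
      let items := PySem.Chars.split₀ substr
      let sensors' :=
        if items.length < 2 then sensors          -- print("Problem parsing substring: ", substr)
        else
          let value := (PySem.List.pyRange 1 (PySem.List.len items)).foldl
            (fun acc i => acc ++ [String.ofList (PySem.List.pyGetD items i [])]) []
          sensors.insert (String.ofList (PySem.List.pyGetD items 0 [])) value
      parseLoop (rest.drop b_close.toNat) sensors'     -- b_open = str_sensors.find('(', b_close)
    else none                                     -- print("Problem parsing sensor string: ", …)
  else some sensors
termination_by t.length
decreasing_by
  have hpre := (PySem.Chars.find_spec h).1
  have hpre2 := (PySem.Chars.find_spec h2).1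
  have h1 : ['('] <+: t.drop (PySem.Chars.find t ['(']).toNat := hpre
  have hne : t.drop (PySem.Chars.find t ['(']).toNat ≠ [] := by
    intro hnil; rw [hnil] at h1; exact absurd (List.prefix_nil.mp h1) (by simp)
  have hlt : (PySem.Chars.find t ['(']).toNat < t.length := by
    by_contra hge
    exact hne (List.drop_eq_nil_of_le (by omega))
  -- b_close ≥ 1: the suffix starts with '(' , not ')'
  have hbc : 1 ≤ (PySem.Chars.find (t.drop (PySem.Chars.find t ['(']).toNat) [')']).toNat := by
    by_contra hz
    have h0 : (PySem.Chars.find (t.drop (PySem.Chars.find t ['(']).toNat) [')']).toNat = 0 := by omega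
    rw [h0] at hpre2
    simp only [List.drop_zero] at hpre2
    obtain ⟨u, hu⟩ := h1
    obtain ⟨v, hv⟩ := hpre2
    have hv' : ([')'] ++ v : List Char) = List.drop (PySem.Chars.find t ['(']).toNat t := hv
    rw [← hu] at hv'
    exact absurd (List.head_eq_of_cons_eq hv') (by decide)
  simp only [List.length_drop]
  omega

def parse (str_sensors : String) : Option (List (String × List String)) :=
  match parseLoop str_sensors.toList PySem.Dict.empty with
  | none => none
  | some sensors => some sensors.items

-- ===== PORT B =====
-- one chunk of the for-loop body of B
def bStep (sensors : PySem.Dict String (List String)) (seg : List Char) :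
    PySem.Dict String (List String) :=
  let idx := PySem.Chars.find seg ['(']
  if 0 ≤ idx then
    let substr := PySem.List.slice seg (some (idx + 1)) none        -- seg[idx+1:]
    let items := PySem.Chars.split₀ substr
    if items.length < 2 then sensors            -- print("Problem parsing substring: ", substr)
    else sensors.insert (String.ofList (PySem.List.pyGetD items 0 []))
          ((PySem.List.slice items (some 1) none).map String.ofList)    -- items[1:]
  else sensors

def parse_alt (str_sensors : String) : Option (List (String × List String)) :=
  let segs := PySem.Chars.splitOn str_sensors.toList [')']          -- str_sensors.split(')')
  let sensors := (PySem.List.slice segs none (some (-1))).foldl bStep PySem.Dict.empty  -- segs[:-1]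
  if PySem.Chars.isIn ['('] (PySem.List.pyGetD segs (-1) []) then   -- '(' in segs[-1]
    none                                        -- print("Problem parsing sensor string: ", …)
  else some sensors.items

-- ===== PRECONDITION & SPEC =====
def Spec_parse (str_sensors : String) (out : Option (List (String × List String))) : Prop := out = parse_alt str_sensors
instance (str_sensors : String) (out : Option (List (String × List String))) : Decidable (Spec_parse str_sensors out) := by unfold Spec_parse; infer_instance

-- ===== CLAIM (what is proved, stated in full; the proofs are below) =====
def Claim_equal_parse : Prop := ∀ (str_sensors : String), Dom_parse str_sensors → Spec_parse str_sensors (parse str_sensors)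

-- ===== LEMMAS AND PROOFS =====

-- reference form of split(')') used only by the proofs
def mySplit : List Char → List (List Char)
  | [] => [[]]
  | c :: t => if c = ')' then [] :: mySplit t else (mySplit t).modifyHead (c :: ·)

-- reference form of parse_alt's body, on an explicit segment list, used only by the proofs
def altOn (segs : List (List Char)) (d : PySem.Dict String (List String)) :
    Option (PySem.Dict String (List String)) :=
  if PySem.Chars.isIn ['('] (segs.getLast?.getD []) then none
  else some ((segs.dropLast).foldl bStep d)

theorem mySplit_ne_nil (t : List Char) : mySplit t ≠ [] := by
  induction t with
  | nil => simp [mySplit]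
  | cons c t ih =>
    simp only [mySplit]
    split
    · simp
    · cases h : mySplit t with
      | nil => exact absurd h ih
      | cons a l => simp

-- find on a single-character needle: the cons recurrence
theorem find_go_shift (sub : List Char) (hsub : sub ≠ []) (t : List Char) (k : Nat) :
    PySem.Chars.find.go sub t k =
      if PySem.Chars.find t sub = -1 then -1 else PySem.Chars.find t sub + k := by
  induction t generalizing k with
  | nil => simp [PySem.Chars.find, PySem.Chars.find.go, hsub]
  | cons c t ih =>
    simp only [PySem.Chars.find, PySem.Chars.find.go]
    split
    · simp
    · rw [ih (k + 1), ih 1]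
      by_cases hf : PySem.Chars.find t sub = -1
      · simp [hf]
      · have h0 : 0 ≤ PySem.Chars.find t sub := by
          have := PySem.Chars.neg_one_le_find t sub; omega
        have h1 : ¬ (PySem.Chars.find t sub + (1 : Nat) = -1) := by push_cast; omega
        simp only [if_neg hf, if_neg h1]
        push_cast; ring

theorem find_nil_singleton (x : Char) : PySem.Chars.find [] [x] = -1 := by
  simp [PySem.Chars.find, PySem.Chars.find.go]

theorem find_cons_singleton (c x : Char) (t : List Char) :
    PySem.Chars.find (c :: t) [x] =
      if c = x then 0
      else if PySem.Chars.find t [x] = -1 then -1 else PySem.Chars.find t [x] + 1 := by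
  simp only [PySem.Chars.find, PySem.Chars.find.go]
  have hpre : ([x].isPrefixOf (c :: t)) = (x == c) := by
    simp [List.isPrefixOf]
  rw [hpre]
  rcases eq_or_ne c x with rfl | hne
  · simp
  · simp only [beq_iff_eq, if_neg (Ne.symm hne), if_neg hne]
    rw [find_go_shift [x] (by simp) t 1]
    push_cast
    rfl

theorem find_singleton_eq_neg_one_iff (t : List Char) (x : Char) :
    PySem.Chars.find t [x] = -1 ↔ x ∉ t := by
  rw [PySem.Chars.find_eq_neg_one_iff, List.singleton_infix_iff]

theorem isIn_singleton (x : Char) (l : List Char) :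
    PySem.Chars.isIn [x] l = true ↔ x ∈ l := by
  rw [PySem.Chars.isIn_iff_infix, List.singleton_infix_iff]

-- ([x] <+: l.drop i) ↔ l[i]? = some x
theorem singleton_prefix_drop (l : List Char) (i : Nat) (x : Char) :
    [x] <+: l.drop i ↔ l[i]? = some x := by
  constructor
  · rintro ⟨u, hu⟩
    have : (l.drop i).head? = some x := by rw [← hu]; simp
    rwa [List.head?_drop] at this
  · intro h
    have hh : (l.drop i).head? = some x := by rw [List.head?_drop]; exact h
    cases hd : l.drop i with
    | nil => rw [hd] at hh; simp at hh
    | cons a u =>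
      rw [hd] at hh; simp at hh
      exact ⟨u, by subst hh; simp⟩

-- pyRange 1 (n+1) is pyRange 0 n shifted by one
theorem pyRange_one_shift (n : Nat) :
    PySem.List.pyRange 1 ((n : Int) + 1) = (PySem.List.pyRange 0 (n : Int)).map (· + 1) := by
  induction n with
  | zero => decide
  | succ n ih =>
    have h1 : PySem.List.pyRange 1 ((n : Int) + 1 + 1) =
        PySem.List.pyRange 1 ((n : Int) + 1) ++ [(n : Int) + 1] :=
      PySem.List.pyRange_one_succ_right (by omega)
    have h2 : PySem.List.pyRange 0 ((n : Int) + 1) =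
        PySem.List.pyRange 0 (n : Int) ++ [(n : Int)] :=
      PySem.List.pyRange_one_succ_right (by omega)
    push_cast
    rw [h1, h2, ih, List.map_append]
    rfl

-- the value-building loop of A equals items[1:] of B (as strings)
theorem value_loop_eq (items : List (List Char)) :
    (PySem.List.pyRange 1 (PySem.List.len items)).foldl
      (fun acc i => acc ++ [String.ofList (PySem.List.pyGetD items i [])]) [] =
    (PySem.List.slice items (some 1) none).map String.ofList := by
  rw [PySem.List.foldl_append_singleton_eq_map, PySem.List.slice_from items (by omega)]
  simp only [List.nil_append, Int.toNat_one]
  cases items with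
  | nil => decide
  | cons x xs =>
    have hlen : PySem.List.len (x :: xs) = (xs.length : Int) + 1 := by
      simp [PySem.List.len]
    rw [hlen, pyRange_one_shift, List.map_map]
    show List.map _ _ = _
    have hdrop : (x :: xs).drop 1 = xs := rfl
    rw [hdrop]
    have hl : PySem.List.len xs = (xs.length : Int) := by simp [PySem.List.len]
    have step1 : List.map ((fun i => String.ofList (PySem.List.pyGetD (x :: xs) i [])) ∘
          (fun x => x + 1)) (PySem.List.pyRange 0 (xs.length : Int)) =
        List.map (fun j => String.ofList (PySem.List.pyGetD xs j []))
          (PySem.List.pyRange 0 (xs.length : Int)) := by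
      apply List.map_congr_left
      intro i hi
      obtain ⟨h0, _⟩ := PySem.List.mem_pyRange_one.mp hi
      obtain ⟨k, rfl⟩ : ∃ k : Nat, i = (k : Int) := ⟨i.toNat, (Int.toNat_of_nonneg h0).symm⟩
      simp only [Function.comp]
      congr 1
      have hcast : ((k : Int) + 1) = ((k + 1 : Nat) : Int) := by push_cast; ring
      rw [hcast]
      simp [PySem.List.pyGetD, PySem.List.pyGet?_natCast]
    rw [step1,
      show (fun j => String.ofList (PySem.List.pyGetD xs j [])) =
        String.ofList ∘ (fun j : Int => PySem.List.pyGetD xs j []) from rfl,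
      ← List.map_map, ← hl, PySem.List.map_pyGetD_pyRange_zero xs []]

-- B's loop body ignores a non-'(' head character
theorem bStep_cons_ne (c : Char) (hc : c ≠ '(') (s : List Char) (d : PySem.Dict String (List String)) :
    bStep d (c :: s) = bStep d s := by
  unfold bStep
  rw [find_cons_singleton, if_neg hc]
  by_cases hf : PySem.Chars.find s ['('] = -1
  · rw [hf]; simp
  · have h0 : 0 ≤ PySem.Chars.find s ['('] := by
      have := PySem.Chars.neg_one_le_find s ['(']; omega
    rw [if_neg hf]
    simp only [if_pos (by omega : (0:Int) ≤ PySem.Chars.find s ['('] + 1), if_pos h0]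
    have e1 : PySem.List.slice (c :: s) (some (PySem.Chars.find s ['('] + 1 + 1)) none =
        PySem.List.slice s (some (PySem.Chars.find s ['('] + 1)) none := by
      rw [PySem.List.slice_from _ (by omega), PySem.List.slice_from _ (by omega)]
      have : (PySem.Chars.find s ['('] + 1 + 1).toNat =
          (PySem.Chars.find s ['('] + 1).toNat + 1 := by omega
      rw [this, List.drop_succ_cons]
    rw [e1]

-- A's loop ignores a non-'(' head character
theorem parseLoop_cons_ne (c : Char) (hc : c ≠ '(') (t : List Char)
    (d : PySem.Dict String (List String)) :
    parseLoop (c :: t) d = parseLoop t d := by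
  conv_lhs => rw [parseLoop]
  conv_rhs => rw [parseLoop]
  rw [find_cons_singleton, if_neg hc]
  by_cases hf : PySem.Chars.find t ['('] = -1
  · rw [hf]; simp
  · have h0 : 0 ≤ PySem.Chars.find t ['('] := by
      have := PySem.Chars.neg_one_le_find t ['(']; omega
    rw [if_neg hf]
    rw [dif_pos (by omega : (0:Int) ≤ PySem.Chars.find t ['('] + 1), dif_pos h0]
    have : (PySem.Chars.find t ['('] + 1).toNat = (PySem.Chars.find t ['(']).toNat + 1 := by
      omega
    rw [this, List.drop_succ_cons]

theorem mySplit_no_sep (t : List Char) (h : ')' ∉ t) : mySplit t = [t] := by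
  induction t with
  | nil => rfl
  | cons c t ih =>
    simp only [List.mem_cons, not_or] at h
    simp only [mySplit, if_neg (Ne.symm h.1)]
    rw [ih h.2]
    rfl

theorem mySplit_append_sep (a : List Char) (e : List Char) (h : ')' ∉ a) :
    mySplit (a ++ ')' :: e) = a :: mySplit e := by
  induction a with
  | nil => simp [mySplit]
  | cons c a ih =>
    simp only [List.mem_cons, not_or] at h
    simp only [List.cons_append, mySplit, if_neg (Ne.symm h.1)]
    rw [ih h.2]
    rfl

-- splitOn with separator ")" computes mySplit
theorem splitOn_go_eq (fuel : Nat) (l cur : List Char) (acc : List (List Char))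
    (hfuel : l.length < fuel) :
    PySem.Chars.splitOn.go [')'] fuel l cur acc =
      acc.reverse ++ (mySplit l).modifyHead (cur.reverse ++ ·) := by
  induction l generalizing fuel cur acc with
  | nil =>
    cases fuel with
    | zero => omega
    | succ f => simp [PySem.Chars.splitOn.go, mySplit]
  | cons c rest ih =>
    cases fuel with
    | zero => simp at hfuel
    | succ f =>
      have hpre : ([')'].isPrefixOf (c :: rest)) = (')' == c) := by simp [List.isPrefixOf]
      rcases eq_or_ne c ')' with rfl | hne
      · rw [show PySem.Chars.splitOn.go [')'] (f + 1) (')' :: rest) cur acc =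
            PySem.Chars.splitOn.go [')'] f (List.drop [')'].length (')' :: rest)) []
              (cur.reverse :: acc) by
            simp [PySem.Chars.splitOn.go, hpre]]
        simp only [List.length_cons, List.length_nil, Nat.zero_add, List.drop_succ_cons,
          List.drop_zero]
        rw [ih f [] (cur.reverse :: acc) (by simp at hfuel ⊢; omega)]
        have hid2 : List.modifyHead (fun x => ([] : List Char).reverse ++ x) (mySplit rest) =
            mySplit rest := by
          cases h : mySplit rest <;> simp
        rw [hid2]
        simp [mySplit]
      · rw [show PySem.Chars.splitOn.go [')'] (f + 1) (c :: rest) cur acc =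
            PySem.Chars.splitOn.go [')'] f rest (c :: cur) acc by
            simp [PySem.Chars.splitOn.go, hpre, Ne.symm hne]]
        rw [ih f (c :: cur) acc (by simp at hfuel ⊢; omega)]
        simp only [mySplit, if_neg hne, List.modifyHead_modifyHead]
        have hfun : (fun x => (c :: cur).reverse ++ x) =
            ((fun x : List Char => cur.reverse ++ x) ∘ (fun x => c :: x)) := by
          funext x; simp
        rw [hfun]

theorem splitOn_eq_mySplit (l : List Char) :
    PySem.Chars.splitOn l [')'] = mySplit l := by
  rw [PySem.Chars.splitOn, splitOn_go_eq _ _ _ _ (by omega)]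
  cases h : mySplit l with
  | nil => exact absurd h (mySplit_ne_nil l)
  | cons a s => simp

-- altOn congruence lemmas
theorem bStep_nil (d : PySem.Dict String (List String)) : bStep d [] = d := by
  unfold bStep
  rw [find_nil_singleton]
  simp

theorem altOn_cons_step (s : List Char) (segs : List (List Char)) (hne : segs ≠ [])
    (d : PySem.Dict String (List String)) : altOn (s :: segs) d = altOn segs (bStep d s) := by
  cases segs with
  | nil => exact absurd rfl hne
  | cons s2 rest =>
    unfold altOn
    rw [List.getLast?_cons_cons, List.dropLast_cons₂, List.foldl_cons]

theorem altOn_cons_empty (segs : List (List Char)) (hne : segs ≠ [])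
    (d : PySem.Dict String (List String)) : altOn ([] :: segs) d = altOn segs d := by
  rw [altOn_cons_step _ _ hne, bStep_nil]

theorem isIn_cons_ne (x c : Char) (hc : x ≠ c) (l : List Char) :
    PySem.Chars.isIn [x] (c :: l) = PySem.Chars.isIn [x] l := by
  rcases h : PySem.Chars.isIn [x] l with _ | _
  · rcases h2 : PySem.Chars.isIn [x] (c :: l) with _ | _
    · rfl
    · have := (isIn_singleton x (c :: l)).mp h2
      simp only [List.mem_cons] at this
      rcases this with rfl | hm
      · exact absurd rfl hc
      · exact absurd ((isIn_singleton x l).mpr hm) (by rw [h]; simp)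
  · exact (isIn_singleton x (c :: l)).mpr (List.mem_cons_of_mem c ((isIn_singleton x l).mp h))

theorem altOn_modifyHead (c : Char) (hc : c ≠ '(') (segs : List (List Char)) (hne : segs ≠ [])
    (d : PySem.Dict String (List String)) :
    altOn (segs.modifyHead (c :: ·)) d = altOn segs d := by
  cases segs with
  | nil => exact absurd rfl hne
  | cons s rest =>
    simp only [List.modifyHead_cons]
    cases rest with
    | nil =>
      unfold altOn
      simp only [List.getLast?_singleton, Option.getD_some, List.dropLast_singleton,
        isIn_cons_ne '(' c (Ne.symm hc)]
    | cons s2 rest2 =>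
      rw [altOn_cons_step (c :: s) (s2 :: rest2) (by simp),
        altOn_cons_step s (s2 :: rest2) (by simp), bStep_cons_ne c hc]

theorem parseLoop_nil (d : PySem.Dict String (List String)) :
    parseLoop [] d = some d := by
  rw [parseLoop, find_nil_singleton]
  norm_num

theorem altOn_mySplit_nil (d : PySem.Dict String (List String)) :
    altOn (mySplit []) d = some d := by
  have h : PySem.Chars.isIn ['('] ([] : List Char) = false := by decide
  simp [mySplit, altOn, h]

-- MAIN: A's loop on suffix t equals B's chunk pass over mySplit t
theorem main_loop (n : Nat) : ∀ (t : List Char), t.length ≤ n →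
    ∀ (d : PySem.Dict String (List String)), parseLoop t d = altOn (mySplit t) d := by
  induction n with
  | zero =>
    intro t ht d
    have h0 : t = [] := List.eq_nil_of_length_eq_zero (by omega)
    subst h0
    rw [parseLoop_nil, altOn_mySplit_nil]
  | succ n ih =>
    intro t ht d
    cases t with
    | nil => rw [parseLoop_nil, altOn_mySplit_nil]
    | cons c b =>
      by_cases hc : c = '('
      · subst hc
        rw [parseLoop]
        have hfind0 : PySem.Chars.find ('(' :: b) ['('] = 0 := by
          rw [find_cons_singleton]; simp
        rw [hfind0, dif_pos (by norm_num : (0:Int) ≤ 0)]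
        have hdz : ((0:Int).toNat) = 0 := rfl
        rw [hdz, List.drop_zero]
        have hbc' : PySem.Chars.find ('(' :: b) [')'] =
            if PySem.Chars.find b [')'] = -1 then -1 else PySem.Chars.find b [')'] + 1 := by
          rw [find_cons_singleton, if_neg (by decide)]
        by_cases hj : PySem.Chars.find b [')'] = -1
        · have hneg : PySem.Chars.find ('(' :: b) [')'] = -1 := by rw [hbc', if_pos hj]
          simp only [hneg]
          rw [dif_neg (by norm_num : ¬ (0:Int) ≤ -1)]
          have hnb : ')' ∉ b := (find_singleton_eq_neg_one_iff b ')').mp hj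
          have hnt : ')' ∉ ('(' :: b) := by
            intro hm
            rcases List.mem_cons.mp hm with h | h
            · exact absurd h (by decide)
            · exact hnb h
          rw [mySplit_no_sep _ hnt]
          unfold altOn
          have hin : PySem.Chars.isIn ['('] ('(' :: b) = true :=
            (isIn_singleton _ _).mpr (by simp)
          simp [hin]
        · have hj0 : 0 ≤ PySem.Chars.find b [')'] := by
            have := PySem.Chars.neg_one_le_find b [')']; omega
          have hposeq : PySem.Chars.find ('(' :: b) [')'] = PySem.Chars.find b [')'] + 1 := by
            rw [hbc', if_neg hj]
          simp only [hposeq]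
          rw [dif_pos (by omega : (0:Int) ≤ PySem.Chars.find b [')'] + 1)]
          have hj1 : (PySem.Chars.find b [')'] + 1).toNat = (PySem.Chars.find b [')']).toNat + 1 := by
            omega
          have hgot : b[(PySem.Chars.find b [')']).toNat]? = some ')' :=
            (singleton_prefix_drop b _ ')').mp (PySem.Chars.find_spec hj0).1
          obtain ⟨hjlt, hjval⟩ := List.getElem?_eq_some_iff.mp hgot
          have hsplitb : b.drop (PySem.Chars.find b [')']).toNat =
              ')' :: b.drop ((PySem.Chars.find b [')']).toNat + 1) := by
            rw [List.drop_eq_getElem_cons hjlt, hjval]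
          have hnota : ')' ∉ b.take (PySem.Chars.find b [')']).toNat := by
            intro hm
            obtain ⟨k, hk, hkv⟩ := List.getElem_of_mem hm
            have hk' : k < (PySem.Chars.find b [')']).toNat := by
              simp at hk; omega
            have hkb : b[k]? = some ')' := by
              rw [List.getElem?_eq_some_iff]
              refine ⟨by omega, ?_⟩
              rw [← hkv, List.getElem_take]
            have hpre := (singleton_prefix_drop b k ')').mpr hkb
            exact ((PySem.Chars.find_spec hj0).2 k hk') hpre
          -- the slice taken and the continuation suffix
          rw [hj1, List.take_succ_cons, List.drop_succ_cons]
          have htail : List.drop 1 ('(' :: b.take (PySem.Chars.find b [')']).toNat) =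
              b.take (PySem.Chars.find b [')']).toNat := rfl
          rw [htail, hsplitb]
          rw [parseLoop_cons_ne ')' (by decide)]
          have hlen : (b.drop ((PySem.Chars.find b [')']).toNat + 1)).length ≤ n := by
            simp only [List.length_cons] at ht
            simp only [List.length_drop]
            omega
          rw [ih _ hlen]
          -- right-hand side
          have hb : b = b.take (PySem.Chars.find b [')']).toNat ++
              ')' :: b.drop ((PySem.Chars.find b [')']).toNat + 1) := by
            conv_lhs => rw [← List.take_append_drop (PySem.Chars.find b [')']).toNat b]
            rw [hsplitb]
          have hms := congrArg mySplit hb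
          rw [mySplit_append_sep _ _ hnota] at hms
          have hmt : mySplit ('(' :: b) =
              ('(' :: b.take (PySem.Chars.find b [')']).toNat) ::
                mySplit (b.drop ((PySem.Chars.find b [')']).toNat + 1)) := by
            simp only [mySplit, if_neg (by decide : ¬ '(' = ')')]
            rw [hms, List.modifyHead_cons]
          rw [hmt, altOn_cons_step _ _ (mySplit_ne_nil _)]
          -- A's dict update equals B's loop body on this chunk
          congr 1
          unfold bStep
          have hfind0' : PySem.Chars.find ('(' :: b.take (PySem.Chars.find b [')']).toNat) ['('] = 0 := by
            rw [find_cons_singleton]; simp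
          rw [hfind0', if_pos (by norm_num : (0:Int) ≤ 0)]
          have hslice : PySem.List.slice ('(' :: b.take (PySem.Chars.find b [')']).toNat)
              (some (0 + 1)) none = b.take (PySem.Chars.find b [')']).toNat := by
            rw [PySem.List.slice_from _ (by omega)]
            rfl
          rw [hslice, value_loop_eq]
      · rw [parseLoop_cons_ne c hc]
        have hlen : b.length ≤ n := by
          simp only [List.length_cons] at ht; omega
        rw [ih _ hlen]
        by_cases hcr : c = ')'
        · subst hcr
          have : mySplit (')' :: b) = [] :: mySplit b := by
            simp [mySplit]
          rw [this, altOn_cons_empty _ (mySplit_ne_nil _)]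
        · have : mySplit (c :: b) = (mySplit b).modifyHead (c :: ·) := by
            simp [mySplit, hcr]
          rw [this, altOn_modifyHead c hc _ (mySplit_ne_nil _)]

theorem pyGetD_neg_one {α : Type} (l : List α) (h : l ≠ []) (d : α) :
    PySem.List.pyGetD l (-1) d = l.getLast?.getD d := by
  cases l with
  | nil => exact absurd rfl h
  | cons x xs =>
    have hn : -((x :: xs).length : Int) ≤ -1 := by simp
    simp only [PySem.List.pyGetD, PySem.List.pyGet?, PySem.List.pyIdx?,
      if_neg (by norm_num : ¬ (0:Int) ≤ -1), if_pos hn, List.getLast?_eq_getElem?]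
    norm_num

-- ===== VERDICT (by name: the statement is the Claim_ definition above) =====
theorem parse_spec : Claim_equal_parse := by
  intro s _
  unfold Spec_parse parse parse_alt
  rw [splitOn_eq_mySplit, main_loop s.toList.length s.toList le_rfl]
  have hne := mySplit_ne_nil s.toList
  have hsl : PySem.List.slice (mySplit s.toList) none (some (-1)) =
      (mySplit s.toList).dropLast := by
    simp [pysem]
  simp only [hsl, pyGetD_neg_one _ hne]
  unfold altOn
  by_cases hP : PySem.Chars.isIn ['('] ((mySplit s.toList).getLast?.getD []) = true
  · simp [hP]
  · simp [hP]
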